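-- pv_equiv track=rewrite | github.com/michaelerne/adventofcode-2022 | day10.py | get_signals
-- ===== SOURCE A (Python) =====
-- def get_signals(data):
--     lines = data.split('\n')
--     signals = [1]
--     for line in lines:
--         match line.split(' '):
--             case ['noop']:
--                 signals.append(signals[-1])
--             case ['addx', value]:
--                 signals += [signals[-1], signals[-1] + int(value)]
--     return signals
-- ===== SOURCE B (Python) =====
-- def get_signals(data):
--     # Phase 1: per-cycle deltas (delta 0 for each cycle, the addx value landing after its 2nd cycle)
--     deltas = [1]
--     for line in data.split('\n'):
--         parts = line.split(' ')
--         if parts == ['noop']: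
--             deltas.append(0)
--         elif len(parts) == 2 and parts[0] == 'addx':
--             deltas += [0, int(parts[1])]
--     # Phase 2: running prefix sums recover the register values
--     out = []
--     total = 0
--     for d in deltas:
--         total += d
--         out.append(total)
--     return out
-- ===== Notes on version B (the rewrite author's own statement) =====
-- stated objective: alternative
-- what changed: B builds a list of per-cycle deltas (0 for each cycle, the addx operand after its second cycle) and recovers the register sequence with a separate prefix-sum pass, instead of A's single pass that extends the output by reading its own last element.
import Mathlib
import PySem

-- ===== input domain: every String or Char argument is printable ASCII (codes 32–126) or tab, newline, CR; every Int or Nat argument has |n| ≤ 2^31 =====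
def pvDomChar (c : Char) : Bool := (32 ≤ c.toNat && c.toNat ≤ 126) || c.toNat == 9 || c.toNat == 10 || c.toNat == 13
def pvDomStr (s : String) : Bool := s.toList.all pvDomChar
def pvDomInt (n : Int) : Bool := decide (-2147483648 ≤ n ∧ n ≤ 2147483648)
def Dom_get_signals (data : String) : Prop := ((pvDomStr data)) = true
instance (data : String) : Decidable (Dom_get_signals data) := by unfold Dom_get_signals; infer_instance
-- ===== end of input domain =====

-- B builds per-cycle deltas then a prefix-sum pass, instead of A's single pass reading its own last element; same return value.

-- ===== PORT A =====
-- one loop iteration of A: extend signals according to the line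
def pvStepA (signals : List Int) (line : String) : List Int :=
  match (PySem.Str.split? line " ").getD [] with
  | ["noop"] => signals ++ [(PySem.List.pyGet? signals (-1)).getD 0]
  | ["addx", value] =>
      signals ++ [(PySem.List.pyGet? signals (-1)).getD 0,
                  (PySem.List.pyGet? signals (-1)).getD 0 + (PySem.Int.ofStr? value).getD 0]
  | _ => signals

def get_signals (data : String) : List Int :=
  ((PySem.Str.split? data "\n").getD []).foldl pvStepA [1]

-- ===== PORT B =====
-- phase 1 iteration of B: extend the delta list according to the line
def pvStepB (deltas : List Int) (line : String) : List Int :=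
  let parts := (PySem.Str.split? line " ").getD []
  if parts = ["noop"] then deltas ++ [0]
  else if parts.length = 2 ∧ parts[0]? = some "addx" then
    deltas ++ [0, (PySem.Int.ofStr? (parts.getD 1 "")).getD 0]
  else deltas

-- phase 2 iteration of B: running total and output
def pvAccStep (p : Int × List Int) (d : Int) : Int × List Int := (p.1 + d, p.2 ++ [p.1 + d])

def get_signals_alt (data : String) : List Int :=
  let deltas := ((PySem.Str.split? data "\n").getD []).foldl pvStepB [1]
  (deltas.foldl pvAccStep (0, [])).2

-- ===== PRECONDITION & SPEC =====
-- every 'addx v' line must carry an int()-parsable operand, else Python A (and B) raises ValueError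
def pvLineOk (line : String) : Bool :=
  match (PySem.Str.split? line " ").getD [] with
  | ["addx", value] => (PySem.Int.ofStr? value).isSome
  | _ => true

def Pre_get_signals (data : String) : Prop :=
  ((PySem.Str.split? data "\n").getD []).all pvLineOk = true
instance (data : String) : Decidable (Pre_get_signals data) := by unfold Pre_get_signals; infer_instance

def pvWitness_get_signals : String := "noop\naddx 3\naddx -5"

def Spec_get_signals (data : String) (out : List Int) : Prop := out = get_signals_alt data
instance (data : String) (out : List Int) : Decidable (Spec_get_signals data out) := by unfold Spec_get_signals; infer_instance

-- ===== CLAIM (what is proved, stated in full; the proofs are below) =====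
def Claim_equal_get_signals : Prop := ∀ (data : String), Dom_get_signals data → Pre_get_signals data → Spec_get_signals data (get_signals data)

-- ===== LEMMAS AND PROOFS =====

-- prefix-sum state after the whole delta list
def pvF (ds : List Int) : Int × List Int := ds.foldl pvAccStep (0, [])

theorem pvF_append (ds : List Int) (x : Int) :
    pvF (ds ++ [x]) = ((pvF ds).1 + x, (pvF ds).2 ++ [(pvF ds).1 + x]) := by
  simp [pvF, List.foldl_append, pvAccStep]

theorem pvF_append2 (ds : List Int) (x y : Int) :
    pvF (ds ++ [x, y]) = ((pvF ds).1 + x + y,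
      (pvF ds).2 ++ [(pvF ds).1 + x, (pvF ds).1 + x + y]) := by
  simp [pvF, List.foldl_append, pvAccStep]

theorem pvInv_step (ds : List Int) (line : String)
    (h : (pvF ds).2.getLast? = some (pvF ds).1) :
    (pvF (pvStepB ds line)).2.getLast? = some (pvF (pvStepB ds line)).1 := by
  unfold pvStepB
  dsimp only
  split_ifs with h1 h2 <;> simp_all [pvF_append, pvF_append2]

theorem pvStep_eq (ds : List Int) (line : String)
    (h : (pvF ds).2.getLast? = some (pvF ds).1) :
    pvStepA (pvF ds).2 line = (pvF (pvStepB ds line)).2 := by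
  unfold pvStepA pvStepB
  cases hs : (PySem.Str.split? line " ").getD [] with
  | nil => simp [hs]
  | cons a tl =>
    cases tl with
    | nil =>
      by_cases ha : a = "noop" <;>
        simp [ha, PySem.List.pyGet?_neg_one, h, pvF_append]
    | cons b tl2 =>
      cases tl2 with
      | nil =>
        by_cases ha : a = "addx"
        · have : ¬ (a = "noop" ∧ b = "" ∧ True) := by simp [ha]
          simp [ha, PySem.List.pyGet?_neg_one, h, pvF_append2]
        · simp [ha]
      | cons c tl3 => simp

theorem pvLoop_eq (lines : List String) : ∀ (ds : List Int),
    (pvF ds).2.getLast? = some (pvF ds).1 →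
    lines.foldl pvStepA (pvF ds).2 = (pvF (lines.foldl pvStepB ds)).2 := by
  induction lines with
  | nil => intro ds _; rfl
  | cons l ls ih =>
    intro ds h
    simp only [List.foldl_cons]
    rw [pvStep_eq ds l h]
    exact ih (pvStepB ds l) (pvInv_step ds l h)

-- ===== VERDICT (by name: the statement is the Claim_ definition above) =====
theorem get_signals_spec : Claim_equal_get_signals := by
  intro data _ _
  unfold Spec_get_signals get_signals get_signals_alt
  have h1 : pvF [1] = (1, [1]) := by simp [pvF, pvAccStep]
  have := pvLoop_eq ((PySem.Str.split? data "\n").getD []) [1] (by rw [h1]; rfl)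
  rw [h1] at this
  exact this
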